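-- pv_equiv track=rewrite | github.com/pypi-data/pypi-mirror-380 | packages/bsy-clippy/bsy_clippy-0.1.0-py3-none-any.whl/bsy_clippy/cli.py | colorize_response
-- ===== SOURCE A (Python) =====
-- from typing import IO, Iterable, List, Optional, Sequence, Tuple
--
-- YELLOW = "\033[93m"
--
-- ANSWER_COLOR = "\033[96m"
--
-- RESET = "\033[0m"
--
-- def colorize_response(text: str) -> str:
--     """Return the response string with ANSI colors applied to think segments."""
--     if not text:
--         return ""
--
--     idx = 0
--     in_think = False
--     output: List[str] = []
--
--     while idx < len(text):
--         if in_think: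
--             close_idx = text.find("</think>", idx)
--             if close_idx == -1:
--                 output.append(f"{YELLOW}{text[idx:]}{RESET}")
--                 break
--
--             if close_idx > idx:
--                 output.append(f"{YELLOW}{text[idx:close_idx]}{RESET}")
--             output.append(f"{YELLOW}</think>{RESET}")
--             idx = close_idx + len("</think>")
--             in_think = False
--         else:
--             open_idx = text.find("<think>", idx)
--             if open_idx == -1:
--                 output.append(f"{ANSWER_COLOR}{text[idx:]}{RESET}")
--                 break
--
--             if open_idx > idx:
--                 output.append(f"{ANSWER_COLOR}{text[idx:open_idx]}{RESET}")
--             output.append(f"{YELLOW}<think>{RESET}")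
--             idx = open_idx + len("<think>")
--             in_think = True
--
--     return "".join(output)
-- ===== SOURCE B (Python) =====
-- YELLOW = "\033[93m"
-- ANSWER_COLOR = "\033[96m"
-- RESET = "\033[0m"
--
-- def _tokenize(text):
--     """Split text into an alternating list of content and tag tokens."""
--     tokens = []
--     i = 0
--     while True:
--         o = text.find("<think>", i)
--         c = text.find("</think>", i)
--         if o == -1 and c == -1:
--             tokens.append(text[i:])
--             return tokens
--         if c == -1 or (o != -1 and o < c):
--             tokens.append(text[i:o])
--             tokens.append("<think>")
--             i = o + 7
--         else:
--             tokens.append(text[i:c])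
--             tokens.append("</think>")
--             i = c + 8
--
-- def colorize_response(text: str) -> str:
--     """Return the response string with ANSI colors applied to think segments."""
--     if not text:
--         return ""
--     out = []
--     buf = []
--     in_think = False
--     for tok in _tokenize(text):
--         if tok == "<think>" and not in_think:
--             s = "".join(buf)
--             if s:
--                 out.append(f"{ANSWER_COLOR}{s}{RESET}")
--             buf = []
--             out.append(f"{YELLOW}<think>{RESET}")
--             in_think = True
--         elif tok == "</think>" and in_think:
--             s = "".join(buf)
--             if s:
--                 out.append(f"{YELLOW}{s}{RESET}")
--             buf = []
--             out.append(f"{YELLOW}</think>{RESET}")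
--             in_think = False
--         else:
--             buf.append(tok)
--     s = "".join(buf)
--     if s:
--         color = YELLOW if in_think else ANSWER_COLOR
--         out.append(f"{color}{s}{RESET}")
--     return "".join(out)
-- ===== Notes on version B (the rewrite author's own statement) =====
-- stated objective: alternative
-- what changed: A interleaves searching for one state-dependent tag with emission in a single index loop; B first tokenizes the whole text into content/tag tokens (splitting at every tag occurrence) and then runs a buffered state machine over the token list, merging state-invalid tags back into the content buffer.
import Mathlib
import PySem

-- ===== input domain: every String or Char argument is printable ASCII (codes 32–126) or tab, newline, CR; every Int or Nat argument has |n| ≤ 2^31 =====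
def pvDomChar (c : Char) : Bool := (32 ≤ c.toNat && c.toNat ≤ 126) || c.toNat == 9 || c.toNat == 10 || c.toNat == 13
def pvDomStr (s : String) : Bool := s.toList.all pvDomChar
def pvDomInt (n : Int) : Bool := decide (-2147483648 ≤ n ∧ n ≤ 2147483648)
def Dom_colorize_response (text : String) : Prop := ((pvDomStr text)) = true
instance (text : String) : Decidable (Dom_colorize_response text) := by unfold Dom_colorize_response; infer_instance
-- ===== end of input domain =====

-- B rewrites A's interleaved find/emit loop as tokenize-once + a buffered state machine (objective: alternative decomposition; same cost).

-- shared string constants (ANSI escapes and the two tags), as char lists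
def pvYEL : List Char := ['\x1b', '[', '9', '3', 'm']
def pvANS : List Char := ['\x1b', '[', '9', '6', 'm']
def pvRST : List Char := ['\x1b', '[', '0', 'm']
def pvTag1 : List Char := ['<', 't', 'h', 'i', 'n', 'k', '>']
def pvTag2 : List Char := ['<', '/', 't', 'h', 'i', 'n', 'k', '>']

-- ===== PORT A =====
-- A's while-loop over an index idx is ported as recursion over the remaining suffix
-- rest = text[idx:]; text.find(tag, idx) becomes PySem.Chars.find rest tag (exact).
def pvLoopA (rest : List Char) (inThink : Bool) : List (List Char) :=
  if _h : rest = [] then []            -- while idx < len(text)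
  else if inThink then
    let c := PySem.Chars.find rest pvTag2
    if _hc : c = -1 then [pvYEL ++ rest ++ pvRST]
    else
      (if 0 < c then [pvYEL ++ rest.take c.toNat ++ pvRST] else [])
        ++ [pvYEL ++ pvTag2 ++ pvRST]
        ++ pvLoopA (rest.drop (c.toNat + 8)) false
  else
    let o := PySem.Chars.find rest pvTag1
    if _ho : o = -1 then [pvANS ++ rest ++ pvRST]
    else
      (if 0 < o then [pvANS ++ rest.take o.toNat ++ pvRST] else [])
        ++ [pvYEL ++ pvTag1 ++ pvRST]
        ++ pvLoopA (rest.drop (o.toNat + 7)) true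
termination_by rest.length
decreasing_by
  all_goals
    have hp : 0 < rest.length := List.length_pos_iff.mpr _h
    simp only [List.length_drop]
    omega

def colorize_response (text : String) : String :=
  if text = "" then "" else String.mk ((pvLoopA text.toList false).flatten)

-- ===== PORT B =====
-- port of Source B's _tokenize (same suffix convention for text.find(tag, i))
def pvTokenize (rest : List Char) : List (List Char) :=
  let o := PySem.Chars.find rest pvTag1
  let c := PySem.Chars.find rest pvTag2
  if _h0 : o = -1 ∧ c = -1 then [rest]
  else if _h1 : c = -1 ∨ (o ≠ -1 ∧ o < c) then
    rest.take o.toNat :: pvTag1 :: pvTokenize (rest.drop (o.toNat + 7))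
  else
    rest.take c.toNat :: pvTag2 :: pvTokenize (rest.drop (c.toNat + 8))
termination_by rest.length
decreasing_by
  · have ho : PySem.Chars.find rest pvTag1 ≠ -1 := by
      rcases _h1 with h | h
      · exact fun hh => _h0 ⟨hh, h⟩
      · exact h.1
    have hin : pvTag1 <:+: rest := (PySem.Chars.find_ne_neg_one_iff _ _).mp ho
    have hlen : pvTag1.length ≤ rest.length := hin.length_le
    simp only [List.length_drop]
    simp [pvTag1] at hlen
    omega
  · have hc : PySem.Chars.find rest pvTag2 ≠ -1 := fun hh => _h1 (Or.inl hh)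
    have hin : pvTag2 <:+: rest := (PySem.Chars.find_ne_neg_one_iff _ _).mp hc
    have hlen : pvTag2.length ≤ rest.length := hin.length_le
    simp only [List.length_drop]
    simp [pvTag2] at hlen
    omega

-- port of Source B's token loop: in_think flag plus a content buffer, flushed at tags and at the end
def pvMachine (tokens : List (List Char)) (inThink : Bool) (buf : List (List Char)) : List (List Char) :=
  match tokens with
  | [] =>
      let s := buf.flatten
      if s = [] then [] else [(if inThink then pvYEL else pvANS) ++ s ++ pvRST]
  | t :: ts =>
      if t = pvTag1 ∧ inThink = false then
        (let s := buf.flatten; if s = [] then [] else [pvANS ++ s ++ pvRST])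
          ++ [pvYEL ++ pvTag1 ++ pvRST] ++ pvMachine ts true []
      else if t = pvTag2 ∧ inThink = true then
        (let s := buf.flatten; if s = [] then [] else [pvYEL ++ s ++ pvRST])
          ++ [pvYEL ++ pvTag2 ++ pvRST] ++ pvMachine ts false []
      else
        pvMachine ts inThink (buf ++ [t])

def colorize_response_alt (text : String) : String :=
  if text = "" then "" else String.mk ((pvMachine (pvTokenize text.toList) false []).flatten)

-- ===== PRECONDITION & SPEC =====
def Spec_colorize_response (text : String) (out : String) : Prop := out = colorize_response_alt text
instance (text : String) (out : String) : Decidable (Spec_colorize_response text out) := by unfold Spec_colorize_response; infer_instance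

-- ===== CLAIM (what is proved, stated in full; the proofs are below) =====
def Claim_equal_colorize_response : Prop := ∀ (text : String), Dom_colorize_response text → Spec_colorize_response text (colorize_response text)

-- ===== LEMMAS AND PROOFS =====

-- p occurs at position k in s, p nonempty ⇒ k < s.length
lemma pv_lt_len {p s : List Char} {k : Nat} (h : p <+: s.drop k) (hp : p ≠ []) :
    k < s.length := by
  obtain ⟨t, ht⟩ := h
  by_contra hk
  push_neg at hk
  rw [List.drop_eq_nil_of_le hk] at ht
  exact hp (List.append_eq_nil_iff.mp ht).1

-- occurrence at k decomposes s
lemma pv_decomp {p s : List Char} {k : Nat} (h : p <+: s.drop k) :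
    s = s.take k ++ p ++ s.drop (k + p.length) := by
  obtain ⟨t, ht⟩ := h
  have h2 : s.drop (k + p.length) = t := by
    have h3 : (s.drop k).drop p.length = t := by rw [← ht]; simp
    rw [← h3, List.drop_drop]
  rw [h2, List.append_assoc, ht, List.take_append_drop]

lemma pv_drop_eq {p s : List Char} {k : Nat} (h : p <+: s.drop k) :
    s.drop k = p ++ s.drop (k + p.length) := by
  obtain ⟨t, ht⟩ := h
  have h3 : (s.drop k).drop p.length = t := by rw [← ht]; simp
  have h4 : s.drop (k + p.length) = t := by rw [← h3, List.drop_drop]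
  rw [h4]
  exact ht.symm

lemma pv_cross21 {s : List Char} {k j : Nat}
    (h2 : pvTag2 <+: s.drop k) (h1 : pvTag1 <+: s.drop j) (hkj : k < j) : k + 8 ≤ j := by
  by_contra hcon
  obtain ⟨t, ht⟩ := h2
  have hdj : s.drop j = (pvTag2 ++ t).drop (j - k) := by
    rw [ht, List.drop_drop]
    congr 1
    omega
  rw [hdj] at h1
  clear ht hdj
  have hi1 : 1 ≤ j - k := by omega
  have hi2 : j - k ≤ 7 := by omega
  set i := j - k with hidef
  clear_value i
  interval_cases i <;> simp [pvTag1, pvTag2, List.cons_prefix_cons] at h1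

lemma pv_cross12 {s : List Char} {k j : Nat}
    (h1 : pvTag1 <+: s.drop k) (h2 : pvTag2 <+: s.drop j) (hkj : k < j) : k + 7 ≤ j := by
  by_contra hcon
  obtain ⟨t, ht⟩ := h1
  have hdj : s.drop j = (pvTag1 ++ t).drop (j - k) := by
    rw [ht, List.drop_drop]
    congr 1
    omega
  rw [hdj] at h2
  clear ht hdj
  have hi1 : 1 ≤ j - k := by omega
  have hi2 : j - k ≤ 6 := by omega
  set i := j - k with hidef
  clear_value i
  interval_cases i <;> simp [pvTag1, pvTag2, List.cons_prefix_cons] at h2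

lemma pv_ne_same {s : List Char} {k : Nat}
    (h1 : pvTag1 <+: s.drop k) (h2 : pvTag2 <+: s.drop k) : False := by
  obtain ⟨a, ha⟩ := h1
  obtain ⟨b, hb⟩ := h2
  rw [← hb] at ha
  simp [pvTag1, pvTag2] at ha

lemma pv_find_drop_none {p s : List Char} (m : Nat) (h : PySem.Chars.find s p = -1) :
    PySem.Chars.find (s.drop m) p = -1 := by
  rw [PySem.Chars.find_eq_neg_one_iff] at h ⊢
  intro hin
  exact h (hin.trans (List.drop_suffix m s).isInfix)

lemma pv_find_drop_some {p s : List Char} {k m : Nat}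
    (hfind : PySem.Chars.find s p = (k : Int)) (hm : m ≤ k) (hp : p ≠ []) :
    PySem.Chars.find (s.drop m) p = ((k - m : Nat) : Int) := by
  have h0 : 0 ≤ PySem.Chars.find s p := by rw [hfind]; positivity
  obtain ⟨hocc, hmin⟩ := PySem.Chars.find_spec h0
  rw [hfind] at hocc hmin
  simp only [Int.toNat_natCast] at hocc hmin
  -- occurrence of p in s.drop m at position k - m
  have hocc' : p <+: (s.drop m).drop (k - m) := by
    rw [List.drop_drop]
    have : m + (k - m) = k := by omega
    rw [this]
    exact hocc
  have hf0 : 0 ≤ PySem.Chars.find (s.drop m) p := by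
    rw [PySem.Chars.find_nonneg_iff]
    exact hocc'.isInfix.trans (List.drop_suffix (k - m) (s.drop m)).isInfix
  obtain ⟨hocc2, hmin2⟩ := PySem.Chars.find_spec hf0
  have hle1 : (PySem.Chars.find (s.drop m) p).toNat ≤ k - m := by
    by_contra hgt
    exact hmin2 (k - m) (by omega) hocc'
  have hle2 : k - m ≤ (PySem.Chars.find (s.drop m) p).toNat := by
    by_contra hgt
    have : p <+: s.drop (m + (PySem.Chars.find (s.drop m) p).toNat) := by
      rw [← List.drop_drop]
      exact hocc2
    exact hmin _ (by omega) this
  omega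

lemma pv_no_occ {s p : List Char} (h : PySem.Chars.find s p = -1) :
    ∀ j, ¬ p <+: s.drop j := by
  intro j hj
  exact (PySem.Chars.find_eq_neg_one_iff _ _).mp h (hj.isInfix.trans (List.drop_suffix j s).isInfix)

lemma pv_find_spec' {s p : List Char} {k : Nat} (h : PySem.Chars.find s p = (k : Int)) :
    p <+: s.drop k ∧ ∀ j < k, ¬ p <+: s.drop j := by
  have h0 : 0 ≤ PySem.Chars.find s p := by rw [h]; positivity
  obtain ⟨hocc, hmin⟩ := PySem.Chars.find_spec h0
  rw [h] at hocc hmin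
  simp only [Int.toNat_natCast] at hocc hmin
  exact ⟨hocc, hmin⟩

lemma pv_find_cases (s p : List Char) :
    PySem.Chars.find s p = -1 ∨ ∃ k : Nat, PySem.Chars.find s p = (k : Int) := by
  by_cases h : PySem.Chars.find s p = -1
  · exact Or.inl h
  · have hge := PySem.Chars.neg_one_le_find s p
    refine Or.inr ⟨(PySem.Chars.find s p).toNat, ?_⟩
    omega

lemma pv_take_prefix {s q : List Char} {k : Nat} (h : s.take k = q) : q <+: s :=
  h ▸ List.take_prefix k s

lemma pvTokenize_none (s : List Char) (h1 : PySem.Chars.find s pvTag1 = -1)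
    (h2 : PySem.Chars.find s pvTag2 = -1) : pvTokenize s = [s] := by
  rw [pvTokenize.eq_def]
  simp [h1, h2]

lemma pvTokenize_tag1 (s : List Char) (o : Nat) (ho : PySem.Chars.find s pvTag1 = (o : Int))
    (h : PySem.Chars.find s pvTag2 = -1 ∨
         ∃ c : Nat, PySem.Chars.find s pvTag2 = (c : Int) ∧ o < c) :
    pvTokenize s = s.take o :: pvTag1 :: pvTokenize (s.drop (o + 7)) := by
  have hne : ((o : Nat) : Int) ≠ -1 := by omega
  rw [pvTokenize.eq_def]
  rcases h with hc | ⟨c, hc, hoc⟩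
  · simp [ho, hc, hne]
  · have hcne : ((c : Nat) : Int) ≠ -1 := by omega
    have holt : ((o : Nat) : Int) < (c : Int) := by omega
    simp [ho, hc, hne, hcne, holt]

lemma pvTokenize_tag2 (s : List Char) (c : Nat) (hc : PySem.Chars.find s pvTag2 = (c : Int))
    (h : PySem.Chars.find s pvTag1 = -1 ∨
         ∃ o : Nat, PySem.Chars.find s pvTag1 = (o : Int) ∧ c < o) :
    pvTokenize s = s.take c :: pvTag2 :: pvTokenize (s.drop (c + 8)) := by
  have hcne : ((c : Nat) : Int) ≠ -1 := by omega
  rw [pvTokenize.eq_def]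
  rcases h with ho | ⟨o, ho, hco⟩
  · simp [ho, hc, hcne]
  · have hone : ((o : Nat) : Int) ≠ -1 := by omega
    have hnlt : ¬ ((o : Nat) : Int) < (c : Int) := by omega
    simp [ho, hc, hcne, hone, hnlt]

lemma pvMachine_nil (b : Bool) (buf : List (List Char)) :
    pvMachine [] b buf =
      if buf.flatten = [] then [] else [(if b then pvYEL else pvANS) ++ buf.flatten ++ pvRST] := by
  simp [pvMachine]

lemma pvMachine_buffer (t : List Char) (ts : List (List Char)) (b : Bool) (buf : List (List Char))
    (h1 : ¬(t = pvTag1 ∧ b = false)) (h2 : ¬(t = pvTag2 ∧ b = true)) :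
    pvMachine (t :: ts) b buf = pvMachine ts b (buf ++ [t]) := by
  simp [pvMachine, h1, h2]

lemma pvMachine_open (ts : List (List Char)) (buf : List (List Char)) :
    pvMachine (pvTag1 :: ts) false buf =
      (if buf.flatten = [] then [] else [pvANS ++ buf.flatten ++ pvRST])
        ++ [pvYEL ++ pvTag1 ++ pvRST] ++ pvMachine ts true [] := by
  simp [pvMachine]

lemma pvMachine_close (ts : List (List Char)) (buf : List (List Char)) :
    pvMachine (pvTag2 :: ts) true buf =
      (if buf.flatten = [] then [] else [pvYEL ++ buf.flatten ++ pvRST])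
        ++ [pvYEL ++ pvTag2 ++ pvRST] ++ pvMachine ts false [] := by
  have : pvTag2 ≠ pvTag1 := by decide
  simp [pvMachine, this]

-- no <think> in s: the machine buffers everything and flushes once in ANSWER color
lemma pv_runF (n : Nat) : ∀ (s : List Char) (buf : List (List Char)), s.length ≤ n →
    PySem.Chars.find s pvTag1 = -1 →
    pvMachine (pvTokenize s) false buf =
      (if buf.flatten ++ s = [] then [] else [pvANS ++ (buf.flatten ++ s) ++ pvRST]) := by
  induction n using Nat.strong_induction_on with
  | _ n ih =>
  intro s buf hlen hnone
  have hno : ∀ j, ¬ pvTag1 <+: s.drop j := pv_no_occ hnone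
  rcases pv_find_cases s pvTag2 with hc | ⟨k, hk⟩
  · rw [pvTokenize_none s hnone hc]
    have hs1 : ¬(s = pvTag1 ∧ (false : Bool) = false) := by
      rintro ⟨rfl, -⟩
      exact hno 0 (by simp)
    have hs2 : ¬(s = pvTag2 ∧ (false : Bool) = true) := by simp
    rw [pvMachine_buffer _ _ _ _ hs1 hs2, pvMachine_nil]
    simp
  · obtain ⟨hocck, hmink⟩ := pv_find_spec' hk
    have hklen : k < s.length := pv_lt_len hocck (by decide)
    rw [pvTokenize_tag2 s k hk (Or.inl hnone)]
    have ht1 : ¬(s.take k = pvTag1 ∧ (false : Bool) = false) := by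
      rintro ⟨h, -⟩
      exact hno 0 (by simpa using pv_take_prefix h)
    have ht2 : ¬(s.take k = pvTag2 ∧ (false : Bool) = true) := by simp
    rw [pvMachine_buffer _ _ _ _ ht1 ht2]
    rw [pvMachine_buffer _ _ _ _ (by decide) (by simp)]
    rw [ih (s.drop (k + 8)).length (by simp; omega) _ _ le_rfl (pv_find_drop_none _ hnone)]
    have hdec := pv_decomp hocck
    simp only [pvTag2, List.length_cons, List.length_nil] at hdec
    have key : s.take k ++ (pvTag2 ++ s.drop (k + 8)) = s := by
      conv_rhs => rw [hdec]
      simp [pvTag2]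
    simp only [List.flatten_append, List.flatten_cons, List.flatten_nil, List.append_nil,
      List.append_assoc, key]

-- first <think> at o: machine = flush(buf+prefix) ++ colored tag ++ machine on the rest
lemma pv_runF2 (n : Nat) : ∀ (s : List Char) (buf : List (List Char)) (o : Nat), s.length ≤ n →
    PySem.Chars.find s pvTag1 = (o : Int) →
    pvMachine (pvTokenize s) false buf =
      (if buf.flatten ++ s.take o = [] then [] else [pvANS ++ (buf.flatten ++ s.take o) ++ pvRST])
        ++ [pvYEL ++ pvTag1 ++ pvRST] ++ pvMachine (pvTokenize (s.drop (o + 7))) true [] := by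
  induction n using Nat.strong_induction_on with
  | _ n ih =>
  intro s buf o hlen ho
  obtain ⟨hocco, hmino⟩ := pv_find_spec' ho
  have htko : ¬(s.take o = pvTag1 ∧ (false : Bool) = false) := by
    rintro ⟨h, -⟩
    have h0 : pvTag1 <+: s.drop 0 := by simpa using pv_take_prefix h
    rcases Nat.eq_zero_or_pos o with rfl | hop
    · have := congrArg List.length h
      simp [pvTag1] at this
    · exact hmino 0 hop h0
  rcases pv_find_cases s pvTag2 with hc | ⟨k, hk⟩
  · -- tag1 branch of the tokenizer
    rw [pvTokenize_tag1 s o ho (Or.inl hc)]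
    rw [pvMachine_buffer _ _ _ _ htko (by simp), pvMachine_open]
    simp [List.flatten_append]
  · obtain ⟨hocck, hmink⟩ := pv_find_spec' hk
    have hne : o ≠ k := fun h => pv_ne_same hocco (h ▸ hocck)
    rcases Nat.lt_or_ge o k with holt | hkge
    · -- tag1 first
      rw [pvTokenize_tag1 s o ho (Or.inr ⟨k, hk, holt⟩)]
      rw [pvMachine_buffer _ _ _ _ htko (by simp), pvMachine_open]
      simp [List.flatten_append]
    · have hklt : k < o := by omega
      have hko : k + 8 ≤ o := pv_cross21 hocck hocco hklt
      have hklen : k < s.length := pv_lt_len hocck (by decide)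
      rw [pvTokenize_tag2 s k hk (Or.inr ⟨o, ho, hklt⟩)]
      have ht1 : ¬(s.take k = pvTag1 ∧ (false : Bool) = false) := by
        rintro ⟨h, -⟩
        have h0 : pvTag1 <+: s.drop 0 := by simpa using pv_take_prefix h
        exact hmino 0 (by omega) h0
      rw [pvMachine_buffer _ _ _ _ ht1 (by simp)]
      rw [pvMachine_buffer _ _ _ _ (by decide) (by simp)]
      have hfd : PySem.Chars.find (s.drop (k + 8)) pvTag1 = ((o - (k + 8) : Nat) : Int) :=
        pv_find_drop_some ho (by omega) (by decide)
      rw [ih (s.drop (k + 8)).length (by simp; omega) _ _ _ le_rfl hfd]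
      have hdk : s.drop k = pvTag2 ++ s.drop (k + 8) := by
        have := pv_drop_eq hocck
        rwa [show (pvTag2 : List Char).length = 8 from rfl] at this
      -- s.take o = s.take k ++ pvTag2 ++ (s.drop (k+8)).take (o - (k+8))
      have htake : s.take o = s.take k ++ (pvTag2 ++ (s.drop (k + 8)).take (o - (k + 8))) := by
        calc s.take o = s.take (k + (o - k)) := by congr 1; omega
          _ = s.take k ++ (s.drop k).take (o - k) := List.take_add ..
          _ = s.take k ++ (pvTag2 ++ s.drop (k + 8)).take (o - k) := by rw [hdk]
          _ = s.take k ++ (pvTag2.take (o - k)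
                ++ (s.drop (k + 8)).take (o - k - pvTag2.length)) := by rw [List.take_append]
          _ = s.take k ++ (pvTag2 ++ (s.drop (k + 8)).take (o - (k + 8))) := by
                rw [List.take_of_length_le (show (pvTag2 : List Char).length ≤ o - k by
                  rw [show (pvTag2 : List Char).length = 8 from rfl]; omega)]
                rw [show (pvTag2 : List Char).length = 8 from rfl, Nat.sub_sub]
      have hdrop : (s.drop (k + 8)).drop (o - (k + 8) + 7) = s.drop (o + 7) := by
        rw [List.drop_drop]
        congr 1
        omega
      rw [hdrop]
      simp only [List.flatten_append, List.flatten_cons, List.flatten_nil, List.append_nil,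
        List.append_assoc, htake]

lemma pv_runT (n : Nat) : ∀ (s : List Char) (buf : List (List Char)), s.length ≤ n →
    PySem.Chars.find s pvTag2 = -1 →
    pvMachine (pvTokenize s) true buf =
      (if buf.flatten ++ s = [] then [] else [pvYEL ++ (buf.flatten ++ s) ++ pvRST]) := by
  induction n using Nat.strong_induction_on with
  | _ n ih =>
  intro s buf hlen hnone
  have hno : ∀ j, ¬ pvTag2 <+: s.drop j := pv_no_occ hnone
  rcases pv_find_cases s pvTag1 with ho | ⟨o, ho⟩
  · rw [pvTokenize_none s ho hnone]
    have hs2 : ¬(s = pvTag2 ∧ (true : Bool) = true) := by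
      rintro ⟨rfl, -⟩
      exact hno 0 (by simp)
    rw [pvMachine_buffer _ _ _ _ (by simp) hs2, pvMachine_nil]
    simp
  · obtain ⟨hocco, hmino⟩ := pv_find_spec' ho
    have holen : o < s.length := pv_lt_len hocco (by decide)
    rw [pvTokenize_tag1 s o ho (Or.inl hnone)]
    have ht2 : ¬(s.take o = pvTag2 ∧ (true : Bool) = true) := by
      rintro ⟨h, -⟩
      exact hno 0 (by simpa using pv_take_prefix h)
    rw [pvMachine_buffer _ _ _ _ (by simp) ht2]
    rw [pvMachine_buffer _ _ _ _ (by simp) (by decide)]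
    rw [ih (s.drop (o + 7)).length (by simp; omega) _ _ le_rfl (pv_find_drop_none _ hnone)]
    have hdec := pv_decomp hocco
    simp only [pvTag1, List.length_cons, List.length_nil] at hdec
    have key : s.take o ++ (pvTag1 ++ s.drop (o + 7)) = s := by
      conv_rhs => rw [hdec]
      simp [pvTag1]
    simp only [List.flatten_append, List.flatten_cons, List.flatten_nil, List.append_nil,
      List.append_assoc, key]

lemma pv_runT2 (n : Nat) : ∀ (s : List Char) (buf : List (List Char)) (c : Nat), s.length ≤ n →
    PySem.Chars.find s pvTag2 = (c : Int) →
    pvMachine (pvTokenize s) true buf =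
      (if buf.flatten ++ s.take c = [] then [] else [pvYEL ++ (buf.flatten ++ s.take c) ++ pvRST])
        ++ [pvYEL ++ pvTag2 ++ pvRST] ++ pvMachine (pvTokenize (s.drop (c + 8))) false [] := by
  induction n using Nat.strong_induction_on with
  | _ n ih =>
  intro s buf c hlen hc
  obtain ⟨hoccc, hminc⟩ := pv_find_spec' hc
  have htkc : ¬(s.take c = pvTag2 ∧ (true : Bool) = true) := by
    rintro ⟨h, -⟩
    have h0 : pvTag2 <+: s.drop 0 := by simpa using pv_take_prefix h
    rcases Nat.eq_zero_or_pos c with rfl | hcp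
    · have := congrArg List.length h
      simp [pvTag2] at this
    · exact hminc 0 hcp h0
  rcases pv_find_cases s pvTag1 with ho | ⟨o, ho⟩
  · rw [pvTokenize_tag2 s c hc (Or.inl ho)]
    rw [pvMachine_buffer _ _ _ _ (by simp) htkc, pvMachine_close]
    simp [List.flatten_append]
  · obtain ⟨hocco, hmino⟩ := pv_find_spec' ho
    have hne : o ≠ c := fun h => pv_ne_same hocco (h ▸ hoccc)
    rcases Nat.lt_or_ge c o with hclt | hoge
    · rw [pvTokenize_tag2 s c hc (Or.inr ⟨o, ho, hclt⟩)]
      rw [pvMachine_buffer _ _ _ _ (by simp) htkc, pvMachine_close]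
      simp [List.flatten_append]
    · have holt : o < c := by omega
      have hoc : o + 7 ≤ c := pv_cross12 hocco hoccc holt
      have holen : o < s.length := pv_lt_len hocco (by decide)
      rw [pvTokenize_tag1 s o ho (Or.inr ⟨c, hc, holt⟩)]
      have ht2 : ¬(s.take o = pvTag2 ∧ (true : Bool) = true) := by
        rintro ⟨h, -⟩
        have h0 : pvTag2 <+: s.drop 0 := by simpa using pv_take_prefix h
        exact hminc 0 (by omega) h0
      rw [pvMachine_buffer _ _ _ _ (by simp) ht2]
      rw [pvMachine_buffer _ _ _ _ (by simp) (by decide)]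
      have hfd : PySem.Chars.find (s.drop (o + 7)) pvTag2 = ((c - (o + 7) : Nat) : Int) :=
        pv_find_drop_some hc (by omega) (by decide)
      rw [ih (s.drop (o + 7)).length (by simp; omega) _ _ _ le_rfl hfd]
      have hdo : s.drop o = pvTag1 ++ s.drop (o + 7) := by
        have := pv_drop_eq hocco
        rwa [show (pvTag1 : List Char).length = 7 from rfl] at this
      have htake : s.take c = s.take o ++ (pvTag1 ++ (s.drop (o + 7)).take (c - (o + 7))) := by
        calc s.take c = s.take (o + (c - o)) := by congr 1; omega
          _ = s.take o ++ (s.drop o).take (c - o) := List.take_add ..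
          _ = s.take o ++ (pvTag1 ++ s.drop (o + 7)).take (c - o) := by rw [hdo]
          _ = s.take o ++ (pvTag1.take (c - o)
                ++ (s.drop (o + 7)).take (c - o - pvTag1.length)) := by rw [List.take_append]
          _ = s.take o ++ (pvTag1 ++ (s.drop (o + 7)).take (c - (o + 7))) := by
                rw [List.take_of_length_le (show (pvTag1 : List Char).length ≤ c - o by
                  rw [show (pvTag1 : List Char).length = 7 from rfl]; omega)]
                rw [show (pvTag1 : List Char).length = 7 from rfl, Nat.sub_sub]
      have hdrop : (s.drop (o + 7)).drop (c - (o + 7) + 8) = s.drop (c + 8) := by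
        rw [List.drop_drop]
        congr 1
        omega
      rw [hdrop]
      simp only [List.flatten_append, List.flatten_cons, List.flatten_nil, List.append_nil,
        List.append_assoc, htake]

lemma pv_main (n : Nat) : ∀ (s : List Char) (b : Bool), s.length ≤ n →
    pvLoopA s b = pvMachine (pvTokenize s) b [] := by
  induction n using Nat.strong_induction_on with
  | _ n ih =>
  intro s b hlen
  rw [pvLoopA.eq_def]
  by_cases hnil : s = []
  · subst hnil
    have h1 : PySem.Chars.find ([] : List Char) pvTag1 = -1 := by
      rw [PySem.Chars.find_eq_neg_one_iff]
      intro h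
      have := h.length_le
      simp [pvTag1] at this
    have h2 : PySem.Chars.find ([] : List Char) pvTag2 = -1 := by
      rw [PySem.Chars.find_eq_neg_one_iff]
      intro h
      have := h.length_le
      simp [pvTag2] at this
    rw [pvTokenize_none _ h1 h2]
    simp [pvMachine, pvTag1, pvTag2]
  · simp only [hnil, dif_neg, not_false_iff]
    cases b
    · rcases pv_find_cases s pvTag1 with ho | ⟨o, ho⟩
      · rw [pv_runF s.length s [] le_rfl ho]
        simp [ho, hnil]
      · obtain ⟨hocco, -⟩ := pv_find_spec' ho
        have holen : o < s.length := pv_lt_len hocco (by decide)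
        rw [pv_runF2 s.length s [] o le_rfl ho]
        have hone : ((o : Nat) : Int) ≠ -1 := by omega
        simp only [ho, hone, if_false, Bool.false_eq_true, if_neg, Int.toNat_natCast,
          List.flatten_nil, List.nil_append]
        rw [ih (s.drop (o + 7)).length (by simp; omega) _ _ le_rfl]
        have hto : (s.take o = []) ↔ o = 0 := by
          rw [List.take_eq_nil_iff]
          exact or_iff_left hnil
        by_cases ho0 : o = 0
        · rw [if_neg (by omega), if_pos (hto.mpr ho0)]
          simp [ho0]
        · rw [if_pos (by omega), if_neg (fun hh => ho0 (hto.mp hh))]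
          simp [List.append_assoc]
    · rw [if_pos rfl]
      rcases pv_find_cases s pvTag2 with hc | ⟨k, hk⟩
      · rw [pv_runT s.length s [] le_rfl hc]
        simp [hc, hnil]
      · obtain ⟨hocck, -⟩ := pv_find_spec' hk
        have hklen : k < s.length := pv_lt_len hocck (by decide)
        rw [pv_runT2 s.length s [] k le_rfl hk]
        have hkne : ((k : Nat) : Int) ≠ -1 := by omega
        simp only [hk, hkne, if_false, if_neg, Int.toNat_natCast,
          List.flatten_nil, List.nil_append]
        rw [ih (s.drop (k + 8)).length (by simp; omega) _ _ le_rfl]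
        have htk : (s.take k = []) ↔ k = 0 := by
          rw [List.take_eq_nil_iff]
          exact or_iff_left hnil
        by_cases hk0 : k = 0
        · rw [if_neg (by omega), if_pos (htk.mpr hk0)]
          simp [hk0]
        · rw [if_pos (by omega), if_neg (fun hh => hk0 (htk.mp hh))]
          simp [List.append_assoc]

-- ===== VERDICT (by name: the statement is the Claim_ definition above) =====
theorem colorize_response_spec : Claim_equal_colorize_response := by
  intro text _
  unfold Spec_colorize_response colorize_response colorize_response_alt
  by_cases h : text = ""
  · simp [h]
  · simp only [h, if_false]
    rw [pv_main text.toList.length _ _ le_rfl]
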